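-- pv_equiv track=rewrite | github.com/OwenFeik/owen-bot | scryfall.py | capitalise
-- ===== SOURCE A (Python) =====
-- def capitalise(name):
--     out=''
--     for i in range(0,len(name)): #For each character
--         if (name[i].isalnum() and not name[i-1].isalnum()) or i==0: #If it's a letter preceded by a non-letter
--             out+=name[i].capitalize() #Add the capital version to the out string
--         else: #Otherwise, just normal character
--             out+=name[i] #To out string
--     return out
-- ===== SOURCE B (Python) =====
-- def capitalise(name):
--     # Run-based: split the string into maximal runs of alnum / non-alnum
--     # characters and capitalize the first character of each alnum run.
--     parts = []
--     i, n = 0, len(name)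
--     while i < n:
--         alnum = name[i].isalnum()
--         j = i + 1
--         while j < n and name[j].isalnum() == alnum:
--             j += 1
--         run = name[i:j]
--         parts.append(run[0].capitalize() + run[1:] if alnum else run)
--         i = j
--     return ''.join(parts)
-- ===== Notes on version B (the rewrite author's own statement) =====
-- stated objective: faster
-- what changed: A walks character by character, deciding per index with a lookback at name[i-1] and growing the result by string +=; B splits the string into maximal alnum/non-alnum runs, capitalizes the head of each alnum run, and joins the runs.
import Mathlib
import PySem

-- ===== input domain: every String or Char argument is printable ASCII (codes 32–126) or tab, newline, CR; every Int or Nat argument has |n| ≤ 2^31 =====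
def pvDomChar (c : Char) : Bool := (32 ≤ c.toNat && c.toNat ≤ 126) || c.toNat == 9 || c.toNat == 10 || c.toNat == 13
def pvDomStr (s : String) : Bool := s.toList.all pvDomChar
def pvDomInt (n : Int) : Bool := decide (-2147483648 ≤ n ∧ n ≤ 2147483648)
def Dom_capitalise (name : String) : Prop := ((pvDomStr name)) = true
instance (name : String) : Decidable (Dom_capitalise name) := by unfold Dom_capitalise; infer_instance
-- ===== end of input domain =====

-- B replaces A's per-character lookback at name[i-1] by a run-based scan (maximal
-- alnum/non-alnum runs, capitalizing the head of each alnum run); alternative decomposition.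


-- ===== PORT A =====
-- literal port of A: for i in range(0, len(name)), look at name[i] and name[i-1].
-- name[i].capitalize() on a single character is ported as Chars.upperChar (exact:
-- for one character Python's capitalize equals upper). Indices are always in range
-- (i ∈ [0, n), i-1 ∈ [-1, n-1) with n > 0), so the `.getD ' '` default is never used.
def capitalise (name : String) : String :=
  String.mk ((PySem.List.pyRange 0 (PySem.Str.len name)).foldl (fun out i =>
    if (PySem.Chars.isalnum ((PySem.List.pyGet? name.toList i).getD ' ')
          && !PySem.Chars.isalnum ((PySem.List.pyGet? name.toList (i - 1)).getD ' ')) || i == 0 then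
      out ++ [PySem.Chars.upperChar ((PySem.List.pyGet? name.toList i).getD ' ')]
    else
      out ++ [(PySem.List.pyGet? name.toList i).getD ' ']) [])

-- ===== PORT B =====
-- port of Source B: peel off the next maximal run (same isalnum value as its head),
-- uppercase the head of an alnum run (run[0].capitalize(), exact as upperChar on
-- one character), keep a non-alnum run verbatim, recurse on the remainder.
def capGo (cs : List Char) : List Char :=
  match cs with
  | [] => []
  | c :: rest =>
    (if PySem.Chars.isalnum c then
        PySem.Chars.upperChar c :: rest.takeWhile (fun x => PySem.Chars.isalnum x == PySem.Chars.isalnum c)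
      else
        c :: rest.takeWhile (fun x => PySem.Chars.isalnum x == PySem.Chars.isalnum c))
      ++ capGo (rest.dropWhile (fun x => PySem.Chars.isalnum x == PySem.Chars.isalnum c))
termination_by cs.length
decreasing_by
  simp only [List.length_cons]
  have := List.length_dropWhile_le (fun x => PySem.Chars.isalnum x == PySem.Chars.isalnum c) rest
  omega

def capitalise_alt (name : String) : String := String.mk (capGo name.toList)

-- ===== PRECONDITION & SPEC =====
def Spec_capitalise (name : String) (out : String) : Prop := out = capitalise_alt name
instance (name : String) (out : String) : Decidable (Spec_capitalise name out) := by unfold Spec_capitalise; infer_instance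

-- ===== CLAIM (what is proved, stated in full; the proofs are below) =====
def Claim_equal_capitalise : Prop := ∀ (name : String), Dom_capitalise name → Spec_capitalise name (capitalise name)

-- ===== LEMMAS AND PROOFS =====

-- the common specification: one pass carrying "was the previous character alnum?"
def fSpec (prev : Bool) : List Char → List Char
  | [] => []
  | d :: r =>
    (if PySem.Chars.isalnum d && !prev then PySem.Chars.upperChar d else d) :: fSpec (PySem.Chars.isalnum d) r

theorem upperChar_of_not_alnum {c : Char} (h : PySem.Chars.isalnum c = false) :
    PySem.Chars.upperChar c = c := by
  simp only [PySem.Chars.isalnum, PySem.Chars.isalpha, PySem.Chars.upperChar,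
    Bool.or_eq_false_iff] at h ⊢
  rw [if_neg]
  simp [h.1.2]

theorem flatMap_single {α β : Type} (g : α → β) (l : List α) :
    l.flatMap (fun x => [g x]) = l.map g := by
  induction l with
  | nil => rfl
  | cons a l ih => simp [List.flatMap_cons, ih]

-- A's per-step body, at natural index k into cs
def astep (cs : List Char) (k : Nat) : Char :=
  let c := (PySem.List.pyGet? cs (k : Int)).getD ' '
  let p := (PySem.List.pyGet? cs ((k : Int) - 1)).getD ' '
  if (PySem.Chars.isalnum c && !PySem.Chars.isalnum p) || (k : Int) == 0 then
    PySem.Chars.upperChar c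
  else c

theorem pyRange_zero_natCast (n : Nat) :
    PySem.List.pyRange 0 (n : Int) = (List.range n).map (Int.ofNat) := by
  unfold PySem.List.pyRange
  rcases Nat.eq_zero_or_pos n with h | h
  · subst h; simp
  · rw [if_neg (by omega), if_pos (by omega), if_pos (by exact_mod_cast h)]
    have hc : ((n : Int) - 0 + 1 - 1) / 1 = (n : Int) := by omega
    rw [hc, Int.toNat_natCast]
    apply List.map_congr_left
    intro k _
    simp [Int.ofNat_eq_natCast]

theorem astep_shift (rest : List Char) (c d : Char) (k : Nat) :
    astep (c :: d :: rest) (k + 2) = astep (d :: rest) (k + 1) := by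
  have e2 : ((k + 2 : Nat) : Int) - 1 = ((k + 1 : Nat) : Int) := by omega
  have e4 : ((k + 1 : Nat) : Int) - 1 = ((k : Nat) : Int) := by omega
  have z2 : (((k + 2 : Nat) : Int) == 0) = false := by simp; omega
  have z1 : (((k + 1 : Nat) : Int) == 0) = false := by simp; omega
  have g2 : (c :: d :: rest)[k + 2]? = (d :: rest)[k + 1]? := by
    rw [show k + 2 = (k + 1) + 1 by omega, List.getElem?_cons_succ]
  have g1 : (c :: d :: rest)[k + 1]? = (d :: rest)[k]? := List.getElem?_cons_succ ..
  simp only [astep, e2, e4, z2, z1, PySem.List.pyGet?_natCast, g2, g1]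

theorem map_astep_tail (rest : List Char) (c : Char) :
    (List.range rest.length).map (fun k => astep (c :: rest) (k + 1))
      = fSpec (PySem.Chars.isalnum c) rest := by
  induction rest generalizing c with
  | nil => simp [fSpec]
  | cons d r ih =>
    rw [List.length_cons, List.range_succ_eq_map, List.map_cons, List.map_map]
    have hhead : astep (c :: d :: r) 1
        = (if PySem.Chars.isalnum d && !PySem.Chars.isalnum c then PySem.Chars.upperChar d else d) := by
      unfold astep
      norm_num [PySem.List.pyGet?_natCast]
    have htail : (List.range r.length).map ((fun k => astep (c :: d :: r) (k + 1)) ∘ Nat.succ)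
        = fSpec (PySem.Chars.isalnum d) r := by
      rw [← ih d]
      apply List.map_congr_left
      intro k _
      simp only [Function.comp]
      have : k.succ + 1 = k + 2 := by omega
      rw [this, astep_shift]
    rw [hhead, htail]
    rfl

theorem capitalise_empty (name : String) (h : name.toList = []) :
    capitalise name = String.mk [] := by
  unfold capitalise
  have hlen : PySem.Str.len name = (name.toList.length : Int) := rfl
  rw [hlen, h]
  rfl

theorem capitalise_eq_fSpec (name : String) (c : Char) (rest : List Char)
    (h : name.toList = c :: rest) :
    capitalise name = String.mk (PySem.Chars.upperChar c :: fSpec (PySem.Chars.isalnum c) rest) := by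
  unfold capitalise
  have hlen : PySem.Str.len name = (name.toList.length : Int) := rfl
  rw [hlen, pyRange_zero_natCast]
  have hf : (fun (out : List Char) (i : Int) =>
      if (PySem.Chars.isalnum ((PySem.List.pyGet? name.toList i).getD ' ')
            && !PySem.Chars.isalnum ((PySem.List.pyGet? name.toList (i - 1)).getD ' ')) || i == 0 then
        out ++ [PySem.Chars.upperChar ((PySem.List.pyGet? name.toList i).getD ' ')]
      else
        out ++ [(PySem.List.pyGet? name.toList i).getD ' '])
      = fun (out : List Char) (i : Int) =>
          out ++ [if (PySem.Chars.isalnum ((PySem.List.pyGet? name.toList i).getD ' ')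
                && !PySem.Chars.isalnum ((PySem.List.pyGet? name.toList (i - 1)).getD ' ')) || i == 0 then
              PySem.Chars.upperChar ((PySem.List.pyGet? name.toList i).getD ' ')
            else (PySem.List.pyGet? name.toList i).getD ' '] := by
    funext out i
    split_ifs <;> rfl
  rw [hf, PySem.List.foldl_append_eq_flatMap]
  rw [List.flatMap_map, flatMap_single]
  have hmap : ∀ k ∈ List.range name.toList.length,
      (if (PySem.Chars.isalnum ((PySem.List.pyGet? name.toList (Int.ofNat k)).getD ' ')
            && !PySem.Chars.isalnum ((PySem.List.pyGet? name.toList ((Int.ofNat k) - 1)).getD ' ')) || (Int.ofNat k) == 0 then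
          PySem.Chars.upperChar ((PySem.List.pyGet? name.toList (Int.ofNat k)).getD ' ')
        else (PySem.List.pyGet? name.toList (Int.ofNat k)).getD ' ') = astep name.toList k := by
    intro k _
    rfl
  rw [List.map_congr_left hmap, h]
  rw [List.length_cons, List.range_succ_eq_map, List.map_cons, List.map_map]
  have h0 : astep (c :: rest) 0 = PySem.Chars.upperChar c := by
    unfold astep
    norm_num [PySem.List.pyGet?_natCast]
  have ht : (List.range rest.length).map (astep (c :: rest) ∘ Nat.succ)
    = fSpec (PySem.Chars.isalnum c) rest := by
    rw [← map_astep_tail rest c]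
    apply List.map_congr_left
    intro k _
    simp [Function.comp, Nat.succ_eq_add_one]
  rw [List.nil_append, h0, ht]

-- B equals the common specification
theorem takeWhile_dropWhile_capGo (cs : List Char) (a : Bool) :
    cs.takeWhile (fun x => PySem.Chars.isalnum x == a)
      ++ capGo (cs.dropWhile (fun x => PySem.Chars.isalnum x == a)) = fSpec a cs := by
  induction hn : cs.length using Nat.strong_induction_on generalizing cs a with
  | _ n ih =>
    cases cs with
    | nil => simp [capGo, fSpec]
    | cons d r =>
      by_cases hd : PySem.Chars.isalnum d = a
      · rw [List.takeWhile_cons_of_pos (by simp [hd]), List.dropWhile_cons_of_pos (by simp [hd])]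
        rw [List.cons_append]
        rw [ih r.length (by simp [← hn]) r a rfl]
        simp [fSpec, hd]
      · rw [List.takeWhile_cons_of_neg (by simp [hd]), List.dropWhile_cons_of_neg (by simp [hd])]
        rw [List.nil_append, capGo]
        have hsplit : (if PySem.Chars.isalnum d then PySem.Chars.upperChar d :: r.takeWhile (fun x => PySem.Chars.isalnum x == PySem.Chars.isalnum d) else d :: r.takeWhile (fun x => PySem.Chars.isalnum x == PySem.Chars.isalnum d))
            ++ capGo (r.dropWhile (fun x => PySem.Chars.isalnum x == PySem.Chars.isalnum d))
            = (if PySem.Chars.isalnum d then PySem.Chars.upperChar d else d)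
              :: (r.takeWhile (fun x => PySem.Chars.isalnum x == PySem.Chars.isalnum d)
                  ++ capGo (r.dropWhile (fun x => PySem.Chars.isalnum x == PySem.Chars.isalnum d))) := by
          split_ifs <;> rfl
        rw [hsplit, ih r.length (by simp [← hn]) r (PySem.Chars.isalnum d) rfl]
        cases ha : PySem.Chars.isalnum d with
        | true =>
          have haf : a = false := by cases a <;> simp_all
          simp [fSpec, ha, haf]
        | false =>
          have hat : a = true := by cases a <;> simp_all
          simp [fSpec, ha, hat]

theorem capGo_eq_fSpec (c : Char) (rest : List Char) :
    capGo (c :: rest)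
      = (if PySem.Chars.isalnum c then PySem.Chars.upperChar c else c)
        :: fSpec (PySem.Chars.isalnum c) rest := by
  rw [capGo]
  have hsplit : (if PySem.Chars.isalnum c then
        PySem.Chars.upperChar c :: rest.takeWhile (fun x => PySem.Chars.isalnum x == PySem.Chars.isalnum c)
      else c :: rest.takeWhile (fun x => PySem.Chars.isalnum x == PySem.Chars.isalnum c))
      ++ capGo (rest.dropWhile (fun x => PySem.Chars.isalnum x == PySem.Chars.isalnum c))
      = (if PySem.Chars.isalnum c then PySem.Chars.upperChar c else c)
        :: (rest.takeWhile (fun x => PySem.Chars.isalnum x == PySem.Chars.isalnum c)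
            ++ capGo (rest.dropWhile (fun x => PySem.Chars.isalnum x == PySem.Chars.isalnum c))) := by
    split_ifs <;> rfl
  rw [hsplit, takeWhile_dropWhile_capGo]

-- ===== VERDICT (by name: the statement is the Claim_ definition above) =====
theorem capitalise_spec : Claim_equal_capitalise := by
  intro name _
  unfold Spec_capitalise capitalise_alt
  cases h : name.toList with
  | nil => rw [capitalise_empty name h, capGo]
  | cons c rest =>
    rw [capitalise_eq_fSpec name c rest h, capGo_eq_fSpec]
    by_cases ha : PySem.Chars.isalnum c = true
    · simp [ha]
    · simp only [Bool.not_eq_true] at ha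
      rw [if_neg (by simp [ha]), upperChar_of_not_alnum ha]
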